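-- pv_equiv track=rewrite | github.com/agustinadinamarca/Experimentos | 26-02-2021-exp/module/experiments.py | get_semantics_configurations
-- ===== SOURCE A (Python) =====
-- def get_semantics_configurations(number_agents):
-- 	semantics_set = []
--
-- 	for i in range(0, number_agents + 1):
-- 		S = []
-- 		if i == 0:
-- 			for j in range(number_agents):
-- 				S.append(False)
-- 			semantics_set.append(S)
-- 		else:
-- 			for w in range(i):
-- 				S.append(True)
--
-- 			for k in range(i, number_agents):
-- 				S.append(False)
--
-- 			semantics_set.append(S)
--
-- 	return semantics_set
-- ===== SOURCE B (Python) =====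
-- def get_semantics_configurations(number_agents):
--     # Build the staircase incrementally: keep one running row, flip one bit per step.
--     row = [False] * number_agents
--     result = []
--     for i in range(number_agents + 1):
--         result.append(row[:])
--         if i < number_agents:
--             row[i] = True
--     return result
-- ===== Notes on version B (the rewrite author's own statement) =====
-- stated objective: alternative
-- what changed: B maintains a single running row and appends a copy after flipping one bit per step, instead of A rebuilding each row from scratch with two inner append loops.
import Mathlib
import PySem

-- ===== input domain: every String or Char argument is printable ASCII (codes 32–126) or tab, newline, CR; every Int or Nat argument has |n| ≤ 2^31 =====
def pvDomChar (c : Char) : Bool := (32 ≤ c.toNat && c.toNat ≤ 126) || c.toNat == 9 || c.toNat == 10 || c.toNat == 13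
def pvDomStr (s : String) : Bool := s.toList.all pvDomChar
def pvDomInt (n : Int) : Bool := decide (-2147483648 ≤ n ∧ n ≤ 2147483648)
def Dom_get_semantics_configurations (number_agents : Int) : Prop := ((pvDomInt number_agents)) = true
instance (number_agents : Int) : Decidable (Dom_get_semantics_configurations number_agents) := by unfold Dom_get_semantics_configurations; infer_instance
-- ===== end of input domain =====

-- B builds the staircase by flipping one bit of a running row per step instead of rebuilding each row; same cost, different decomposition.

-- ===== PORT A =====
def get_semantics_configurations (number_agents : Int) : List (List Bool) :=
  (PySem.List.pyRange 0 (number_agents + 1) 1).foldl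
    (fun semantics_set i =>
      if i == 0 then
        semantics_set ++ [(PySem.List.pyRange 0 number_agents 1).foldl (fun S _ => S ++ [false]) []]
      else
        let S := (PySem.List.pyRange 0 i 1).foldl (fun S _ => S ++ [true]) []
        let S := (PySem.List.pyRange i number_agents 1).foldl (fun S _ => S ++ [false]) S
        semantics_set ++ [S]) []

-- ===== PORT B =====
def get_semantics_configurations_alt (number_agents : Int) : List (List Bool) :=
  -- row = [False] * number_agents  (a negative multiplier gives [], as toNat does)
  ((PySem.List.pyRange 0 (number_agents + 1) 1).foldl
    (fun (st : List (List Bool) × List Bool) i =>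
      let result := st.1 ++ [st.2]
      let row := if i < number_agents then st.2.set i.toNat true else st.2
      (result, row))
    ([], List.replicate number_agents.toNat false)).1

-- ===== PRECONDITION & SPEC =====
def Spec_get_semantics_configurations (number_agents : Int) (out : List (List Bool)) : Prop := out = get_semantics_configurations_alt number_agents
instance (number_agents : Int) (out : List (List Bool)) : Decidable (Spec_get_semantics_configurations number_agents out) := by unfold Spec_get_semantics_configurations; infer_instance

-- ===== CLAIM (what is proved, stated in full; the proofs are below) =====
def Claim_equal_get_semantics_configurations : Prop := ∀ (number_agents : Int), Dom_get_semantics_configurations number_agents → Spec_get_semantics_configurations number_agents (get_semantics_configurations number_agents)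

-- ===== LEMMAS AND PROOFS =====

-- the common row shape: i leading Trues then n-i Falses
def pvRow (n i : Int) : List Bool :=
  List.replicate i.toNat true ++ List.replicate (n - i).toNat false

lemma foldl_rep {α : Type} (x : Bool) :
    ∀ (l : List α) (init : List Bool),
      l.foldl (fun S _ => S ++ [x]) init = init ++ List.replicate l.length x := by
  intro l
  induction l with
  | nil => simp
  | cons a t ih =>
    intro init
    rw [List.foldl_cons, ih, List.append_assoc, List.length_cons]
    congr 1

lemma A_foldl_eq (n : Int) :
    ∀ (l : List Int) (init : List (List Bool)),
      l.foldl (fun semantics_set i =>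
        if i == 0 then
          semantics_set ++ [(PySem.List.pyRange 0 n 1).foldl (fun S _ => S ++ [false]) []]
        else
          let S := (PySem.List.pyRange 0 i 1).foldl (fun S _ => S ++ [true]) []
          let S := (PySem.List.pyRange i n 1).foldl (fun S _ => S ++ [false]) S
          semantics_set ++ [S]) init = init ++ l.map (pvRow n) := by
  intro l
  induction l with
  | nil => simp
  | cons a t ih =>
    intro init
    rw [List.foldl_cons, ih]
    have hstep : (if a == 0 then
          init ++ [(PySem.List.pyRange 0 n 1).foldl (fun S _ => S ++ [false]) []]
        else
          let S := (PySem.List.pyRange 0 a 1).foldl (fun S _ => S ++ [true]) []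
          let S := (PySem.List.pyRange a n 1).foldl (fun S _ => S ++ [false]) S
          init ++ [S]) = init ++ [pvRow n a] := by
      by_cases ha : a = 0
      · subst ha
        simp [pvRow, PySem.List.length_pyRange_one]
      · have hb : (a == 0) = false := by simpa using ha
        simp only [hb, Bool.false_eq_true, if_false, foldl_rep,
          PySem.List.length_pyRange_one, pvRow]
        simp
    rw [hstep, List.append_assoc]
    simp

lemma set_rep :
    ∀ (m f : ℕ), (List.replicate m true ++ List.replicate (f + 1) false).set m true
      = List.replicate (m + 1) true ++ List.replicate f false := by
  intro m
  induction m with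
  | zero => intro f; simp [List.replicate_succ]
  | succ k ih =>
    intro f
    rw [List.replicate_succ, List.cons_append, List.set_cons_succ, ih f]
    simp [List.replicate_succ]

lemma B_invariant (n : Int) (hn : 0 ≤ n) :
    ∀ (m : ℕ), m ≤ n.toNat →
      (PySem.List.pyRange 0 (m : Int) 1).foldl
        (fun (st : List (List Bool) × List Bool) i =>
          let result := st.1 ++ [st.2]
          let row := if i < n then st.2.set i.toNat true else st.2
          (result, row))
        ([], List.replicate n.toNat false)
      = ((List.range m).map (fun k : ℕ => pvRow n (k : Int)),
          List.replicate m true ++ List.replicate (n.toNat - m) false) := by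
  intro m
  induction m with
  | zero => intro _; simp [PySem.List.pyRange_one_eq_nil, pvRow]
  | succ k ih =>
    intro hk
    have hk' : k ≤ n.toNat := Nat.le_of_succ_le hk
    have hsplit : PySem.List.pyRange 0 ((k : Int) + 1) 1
        = PySem.List.pyRange 0 (k : Int) 1 ++ [(k : Int)] :=
      PySem.List.pyRange_one_succ_right (by exact_mod_cast Nat.zero_le k)
    have hcast : ((k + 1 : ℕ) : Int) = (k : Int) + 1 := by push_cast; ring
    rw [hcast, hsplit, List.foldl_append, ih hk']
    have hklt : (k : Int) < n := by omega
    have htoNat : ((k : Int)).toNat = k := by omega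
    simp only [List.foldl, if_pos hklt, Prod.mk.injEq]
    refine ⟨?_, ?_⟩
    · rw [List.range_succ, List.map_append]
      simp [pvRow]
    · have hfshape : n.toNat - k = (n.toNat - (k + 1)) + 1 := by omega
      rw [htoNat, hfshape, set_rep]

theorem equal_main (n : Int) :
    get_semantics_configurations n = get_semantics_configurations_alt n := by
  by_cases hn : 0 ≤ n
  · unfold get_semantics_configurations get_semantics_configurations_alt
    rw [A_foldl_eq]
    have hsplit : PySem.List.pyRange 0 (n + 1) 1
        = PySem.List.pyRange 0 n 1 ++ [n] := PySem.List.pyRange_one_succ_right hn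
    rw [hsplit, List.foldl_append]
    have hN : ((n.toNat : ℕ) : Int) = n := by omega
    have hinv := B_invariant n hn n.toNat (le_refl _)
    rw [hN] at hinv
    rw [hinv]
    have hnotlt : ¬ (n < n) := lt_irrefl n
    simp only [List.foldl, if_neg hnotlt, List.nil_append, List.map_append, List.map]
    have hmap : List.map (pvRow n) (PySem.List.pyRange 0 n 1)
        = (List.range n.toNat).map (fun k : ℕ => pvRow n (k : Int)) := by
      rw [PySem.List.pyRange_one, List.map_map]
      simp only [Int.sub_zero]
      apply List.map_congr_left
      intro k _
      simp
    have hrow : pvRow n n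
        = List.replicate n.toNat true ++ List.replicate (n.toNat - n.toNat) false := by
      simp [pvRow]
    rw [hmap, hrow]
  · have h1 : PySem.List.pyRange 0 (n + 1) 1 = [] :=
      PySem.List.pyRange_one_eq_nil (by omega)
    unfold get_semantics_configurations get_semantics_configurations_alt
    rw [h1]; rfl

-- ===== VERDICT (by name: the statement is the Claim_ definition above) =====
theorem get_semantics_configurations_spec : Claim_equal_get_semantics_configurations := by
  intro n _
  exact equal_main n
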